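-- pv_equiv track=rewrite | github.com/Darasimi-Ajewole/HackerRank | Strings/Two characters.py | del_red
-- ===== SOURCE A (Python) =====
-- def del_red(string):    #delete redundant
--     death_row = set()
--     index = {}
--     counter = {}
--     prev = None
--     for i,char in enumerate(string):
--         if char == prev:
--             death_row.add(char)
--
--         elif char not in index:
--             index[char] = [i]
--
--         else:
--             index[char].append(i)
--         prev = char
--
--     for char in index:
--         count = len(index[char])
--         if count == 1:
--             death_row.add(char)
--         elif char not in death_row:
--             if count not in counter:
--                 counter[count] = [char]
--             else:
--                 counter[count].append(char)
--
--     [index.pop(char, None) for char in death_row ]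
--     return (index, counter)
-- ===== SOURCE B (Python) =====
-- def del_red(string):    # delete redundant — run-scanning rewrite
--     index = {}
--     doubled = set()
--     i, n = 0, len(string)
--     while i < n:
--         ch = string[i]
--         j = i + 1
--         while j < n and string[j] == ch:
--             j += 1
--         index.setdefault(ch, []).append(i)
--         if j - i > 1:
--             doubled.add(ch)
--         i = j
--     result = {}
--     counter = {}
--     for ch, starts in index.items():
--         if len(starts) > 1 and ch not in doubled:
--             result[ch] = starts
--             counter.setdefault(len(starts), []).append(ch)
--     return (result, counter)
-- ===== Notes on version B (the rewrite author's own statement) =====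
-- stated objective: alternative
-- what changed: B scans the string as maximal runs with a nested while loop (recording each run's start index and flagging runs longer than 1) instead of A's per-character loop with prev-tracking, and builds the surviving index/counter by filtering the run table instead of A's mutate-then-pop-a-death-set pass.
import Mathlib
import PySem

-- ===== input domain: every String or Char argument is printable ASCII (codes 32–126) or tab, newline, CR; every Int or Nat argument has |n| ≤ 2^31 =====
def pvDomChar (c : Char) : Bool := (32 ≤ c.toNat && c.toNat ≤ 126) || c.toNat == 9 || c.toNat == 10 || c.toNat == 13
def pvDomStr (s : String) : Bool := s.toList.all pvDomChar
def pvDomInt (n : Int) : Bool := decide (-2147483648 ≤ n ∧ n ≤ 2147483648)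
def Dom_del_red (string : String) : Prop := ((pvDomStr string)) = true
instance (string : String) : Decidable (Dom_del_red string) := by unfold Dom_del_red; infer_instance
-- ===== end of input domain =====

-- B replaces the char-by-char loop with prev-tracking by a run-scanning loop (each maximal run
-- handled at once) and builds the surviving index by filtering instead of popping a death set
-- (objective: alternative decomposition, same asymptotic cost).

-- ===== PORT A =====
-- first loop body: state = (death_row, index, prev)
def aStep (st : PySem.Set String × PySem.Dict String (List Int) × Option String)
    (p : Int × Char) : PySem.Set String × PySem.Dict String (List Int) × Option String :=
  let ch : String := String.ofList [p.2]
  if some ch == st.2.2 then (PySem.Set.add st.1 ch, st.2.1, some ch)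
  else if !(st.2.1.contains ch) then (st.1, st.2.1.insert ch [p.1], some ch)
  else (st.1, st.2.1.modify ch [] (· ++ [p.1]), some ch)

-- second loop body: state = (death_row, counter)
def aStep2 (st : PySem.Set String × PySem.Dict Int (List String)) (p : String × List Int) :
    PySem.Set String × PySem.Dict Int (List String) :=
  let count : Int := p.2.length
  if count == 1 then (PySem.Set.add st.1 p.1, st.2)
  else if !(PySem.Set.contains st.1 p.1) then
    (st.1, if !(st.2.contains count) then st.2.insert count [p.1] else st.2.modify count [] (· ++ [p.1]))
  else st

def del_red (string : String) : (List (String × List Int)) × (List (Int × List String)) :=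
  let st := (PySem.List.enumerate string.toList 0).foldl aStep (PySem.Set.empty, PySem.Dict.empty, none)
  let st2 := st.2.1.items.foldl aStep2 (st.1, PySem.Dict.empty)
  -- death_row is consumed only to pop keys from index: the resulting dict is the same in any set order
  let index' := st2.1.foldl (fun d ch => d.erase ch) st.2.1
  (index'.items, st2.2.items)

-- ===== PORT B =====
-- inner while loop: number of further chars equal to ch, and the remainder of the list
def bRun (ch : Char) : List Char → Nat × List Char
  | [] => (0, [])
  | c :: cs => if c == ch then ((bRun ch cs).1 + 1, (bRun ch cs).2) else (0, c :: cs)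

theorem bRun_len (ch : Char) : ∀ cs, (bRun ch cs).2.length ≤ cs.length := by
  intro cs; induction cs with
  | nil => simp [bRun]
  | cons c cs ih =>
    by_cases h : c == ch
    · simp [bRun, h]; omega
    · simp [bRun, h]

-- outer while loop over runs: state = (index, doubled), i the current position
def bLoop : List Char → Int → PySem.Dict String (List Int) → PySem.Set String →
    PySem.Dict String (List Int) × PySem.Set String
  | [], _, index, doubled => (index, doubled)
  | c :: cs, i, index, doubled =>
    let r := bRun c cs
    let ch : String := String.ofList [c]
    let j : Int := i + 1 + r.1
    bLoop r.2 j (index.modify ch [] (· ++ [i])) (if j - i > 1 then PySem.Set.add doubled ch else doubled)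
  termination_by cs => cs.length
  decreasing_by simpa using Nat.lt_succ_of_le (bRun_len c cs)

-- second loop body: state = (result, counter)
def bStep2 (doubled : PySem.Set String)
    (st : PySem.Dict String (List Int) × PySem.Dict Int (List String)) (p : String × List Int) :
    PySem.Dict String (List Int) × PySem.Dict Int (List String) :=
  if 1 < p.2.length && !(PySem.Set.contains doubled p.1) then
    (st.1.insert p.1 p.2, st.2.modify (p.2.length : Int) [] (· ++ [p.1]))
  else st

def del_red_alt (string : String) : (List (String × List Int)) × (List (Int × List String)) :=
  let b := bLoop string.toList 0 PySem.Dict.empty PySem.Set.empty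
  let st2 := b.1.items.foldl (bStep2 b.2) (PySem.Dict.empty, PySem.Dict.empty)
  (st2.1.items, st2.2.items)

-- ===== PRECONDITION & SPEC =====
def Spec_del_red (string : String) (out : (List (String × List Int)) × (List (Int × List String))) : Prop := out = del_red_alt string
instance (string : String) (out : (List (String × List Int)) × (List (Int × List String))) : Decidable (Spec_del_red string out) := by unfold Spec_del_red; infer_instance

-- ===== CLAIM (what is proved, stated in full; the proofs are below) =====
def Claim_equal_del_red : Prop := ∀ (string : String), Dom_del_red string → Spec_del_red string (del_red string)

-- ===== LEMMAS AND PROOFS =====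

theorem sCh_inj {a b : Char} : String.ofList [a] = String.ofList [b] ↔ a = b := by
  constructor
  · intro h; have := congrArg String.toList h; simpa using this
  · rintro rfl; rfl

-- A's if/else on `char not in index` is a single Python-style modify
theorem insert_modify {κ : Type} {α : Type} [BEq κ] [LawfulBEq κ]
    (d : PySem.Dict κ (List α)) (k : κ) (v : α) :
    (if !(d.contains k) then d.insert k [v] else d.modify k [] (· ++ [v]))
      = d.modify k [] (· ++ [v]) := by
  by_cases h : d.contains k
  · simp [h]
  · simp only [Bool.not_eq_true] at h
    simp [h, PySem.Dict.modify, PySem.Dict.getD_of_not_contains _ _ h]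

theorem bRun_head (ch : Char) : ∀ cs c, (bRun ch cs).2.head? = some c → c ≠ ch := by
  intro cs; induction cs with
  | nil => simp [bRun]
  | cons x cs ih =>
    intro c h
    by_cases hx : x == ch
    · simp only [bRun, hx, if_pos] at h; exact ih c h
    · simp only [bRun, hx, if_neg, Bool.false_eq_true, not_false_iff] at h
      simp only [List.head?_cons, Option.some.injEq] at h
      subst h; simpa using hx

-- A's loop consumes a run of duplicates: only death_row changes
theorem consume (c : Char) : ∀ (cs : List Char) (i : Int) (death : PySem.Set String)
    (index : PySem.Dict String (List Int)),
    (PySem.List.enumerate cs i).foldl aStep (death, index, some (String.ofList [c]))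
    = (PySem.List.enumerate (bRun c cs).2 (i + (bRun c cs).1)).foldl aStep
        ((if 0 < (bRun c cs).1 then PySem.Set.add death (String.ofList [c]) else death),
          index, some (String.ofList [c])) := by
  intro cs; induction cs with
  | nil => simp [bRun]
  | cons x cs ih =>
    intro i death index
    by_cases hx : x = c
    · subst hx
      rw [PySem.List.enumerate_cons]
      have hstep : aStep (death, index, some (String.ofList [x])) (i, x)
          = (PySem.Set.add death (String.ofList [x]), index, some (String.ofList [x])) := by
        simp [aStep]
      rw [List.foldl_cons, hstep, ih]
      have hidem : (if 0 < (bRun x cs).1 then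
            PySem.Set.add (PySem.Set.add death (String.ofList [x])) (String.ofList [x])
          else PySem.Set.add death (String.ofList [x]))
          = PySem.Set.add death (String.ofList [x]) := by
        split
        · exact PySem.Set.add_of_mem ((PySem.Set.mem_add _ _ _).2 (Or.inr rfl))
        · rfl
      rw [hidem]
      simp only [bRun, beq_self_eq_true, if_pos]
      have harith : i + 1 + ((bRun x cs).1 : Int) = i + (((bRun x cs).1 + 1 : Nat) : Int) := by
        push_cast; ring
      rw [harith]
      have : (0 < (bRun x cs).1 + 1) := Nat.succ_pos _
      simp [this]
    · have hb : bRun c (x :: cs) = (0, x :: cs) := by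
        simp [bRun, hx]
      rw [hb]
      simp

-- values of the index built by A's first loop are nonempty and its keys are unique
theorem aStep_snd (st : PySem.Set String × PySem.Dict String (List Int) × Option String)
    (q : Int × Char) :
    (aStep st q).2.1 = st.2.1 ∨
      ∃ k v, v ≠ ([] : List Int) ∧ (aStep st q).2.1 = st.2.1.insert k v := by
  by_cases h1 : (some (String.ofList [q.2]) == st.2.2) = true
  · left; simp [aStep, h1]
  · right
    by_cases h2 : st.2.1.contains (String.ofList [q.2])
    · refine ⟨String.ofList [q.2], st.2.1.getD (String.ofList [q.2]) [] ++ [q.1], by simp, ?_⟩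
      simp [aStep, h1, h2, PySem.Dict.modify]
    · simp only [Bool.not_eq_true] at h2
      exact ⟨String.ofList [q.2], [q.1], by simp, by simp [aStep, h1, h2]⟩

theorem aFold_inv : ∀ (l : List (Int × Char)) (st : PySem.Set String × PySem.Dict String (List Int) × Option String),
    st.2.1.keys.Nodup → (∀ p ∈ st.2.1.items, p.2 ≠ ([] : List Int)) →
    (l.foldl aStep st).2.1.keys.Nodup ∧ ∀ p ∈ (l.foldl aStep st).2.1.items, p.2 ≠ ([] : List Int) := by
  intro l; induction l with
  | nil => intro st h1 h2; exact ⟨h1, h2⟩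
  | cons q l ih =>
    intro st h1 h2
    rw [List.foldl_cons]
    apply ih
    · rcases aStep_snd st q with h | ⟨k, v, _, h⟩
      · rw [h]; exact h1
      · rw [h]; exact PySem.Dict.nodup_keys_insert _ _ _ h1
    · rcases aStep_snd st q with h | ⟨k, v, hv, h⟩
      · rw [h]; exact h2
      · rw [h]
        intro p hp
        rcases (PySem.Dict.mem_items_insert _ _ _ _).1 hp with h' | h'
        · subst h'; exact hv
        · exact h2 p h'.1

-- death_row after A's second loop, as a membership characterisation
theorem death2_mem : ∀ (l : List (String × List Int)) (death : PySem.Set String)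
    (counter : PySem.Dict Int (List String)) (x : String),
    x ∈ (l.foldl aStep2 (death, counter)).1 ↔ x ∈ death ∨ ∃ p ∈ l, x = p.1 ∧ p.2.length = 1 := by
  intro l; induction l with
  | nil => simp
  | cons p l ih =>
    intro death counter x
    rw [List.foldl_cons]
    by_cases hlen : p.2.length = 1
    · have : aStep2 (death, counter) p = (PySem.Set.add death p.1, counter) := by
        simp [aStep2, hlen]
      rw [this, ih]
      simp only [PySem.Set.mem_add, List.mem_cons]
      constructor
      · rintro (⟨h | h⟩ | ⟨q, hq, hx⟩)
        · exact Or.inl h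
        · exact Or.inr ⟨p, Or.inl rfl, h, hlen⟩
        · exact Or.inr ⟨q, Or.inr hq, hx⟩
      · rintro (h | ⟨q, (rfl | hq), hx, hl⟩)
        · exact Or.inl (Or.inl h)
        · exact Or.inl (Or.inr hx)
        · exact Or.inr ⟨q, hq, hx, hl⟩
    · have hbeq : (((p.2.length : Int)) == 1) = false := by
        simp [hlen]
      have : (aStep2 (death, counter) p).1 = death ∧
          ∃ c', aStep2 (death, counter) p = (death, c') := by
        unfold aStep2
        simp only [hbeq, Bool.false_eq_true, if_neg, not_false_iff]
        split <;> exact ⟨rfl, _, rfl⟩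
      obtain ⟨_, c', hc⟩ := this
      rw [hc, ih]
      constructor
      · rintro (h | ⟨q, hq, hx⟩)
        · exact Or.inl h
        · exact Or.inr ⟨q, List.mem_cons_of_mem _ hq, hx⟩
      · rintro (h | ⟨q, hq, hx, hl⟩)
        · exact Or.inl h
        · rcases List.mem_cons.1 hq with rfl | hq
          · exact absurd hl hlen
          · exact Or.inr ⟨q, hq, hx, hl⟩

-- the two second loops: same counter, and B's result = the filtered items
theorem loop2_eq : ∀ (l : List (String × List Int)) (doubled death : PySem.Set String)
    (counter : PySem.Dict Int (List String)) (res : PySem.Dict String (List Int)),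
    (l.map Prod.fst).Nodup →
    (∀ p ∈ l, p.2 ≠ ([] : List Int)) →
    (∀ p ∈ l, p.1 ∈ death ↔ p.1 ∈ doubled) →
    (∀ p ∈ l, res.contains p.1 = false) →
    (l.foldl (bStep2 doubled) (res, counter)).2 = (l.foldl aStep2 (death, counter)).2
    ∧ (l.foldl (bStep2 doubled) (res, counter)).1.items
        = res.items ++ l.filter (fun p => decide (1 < p.2.length) && !(PySem.Set.contains doubled p.1)) := by
  intro l; induction l with
  | nil => intro _ _ _ _ _ _ _ _; simp
  | cons p l ih =>
    intro doubled death counter res hnd hne hdc hres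
    have hnd' : (l.map Prod.fst).Nodup := (List.nodup_cons.1 (by simpa using hnd)).2
    have hp1 : p.1 ∉ l.map Prod.fst := (List.nodup_cons.1 (by simpa using hnd)).1
    have hkey : ∀ q ∈ l, q.1 ≠ p.1 := by
      intro q hq h
      exact hp1 (h ▸ List.mem_map_of_mem hq)
    rw [List.foldl_cons, List.foldl_cons]
    by_cases hlen : p.2.length = 1
    · have ha : aStep2 (death, counter) p = (PySem.Set.add death p.1, counter) := by
        unfold aStep2
        rw [if_pos (by simp [hlen])]
      have hb : bStep2 doubled (res, counter) p = (res, counter) := by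
        unfold bStep2
        rw [if_neg (by simp [hlen])]
      rw [ha, hb]
      have hdc' : ∀ q ∈ l, q.1 ∈ PySem.Set.add death p.1 ↔ q.1 ∈ doubled := by
        intro q hq
        rw [PySem.Set.mem_add]
        constructor
        · rintro (h | h)
          · exact (hdc q (List.mem_cons_of_mem _ hq)).1 h
          · exact absurd h (hkey q hq)
        · intro h; exact Or.inl ((hdc q (List.mem_cons_of_mem _ hq)).2 h)
      have hih := ih doubled (PySem.Set.add death p.1) counter res hnd'
        (fun q hq => hne q (List.mem_cons_of_mem _ hq)) hdc'
        (fun q hq => hres q (List.mem_cons_of_mem _ hq))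
      refine ⟨hih.1, ?_⟩
      rw [hih.2, List.filter_cons_of_neg (by simp [hlen])]
    · have h1lt : 1 < p.2.length := by
        have hnil := hne p (List.mem_cons_self)
        have : p.2.length ≠ 0 := by simpa using hnil
        omega
      have hbeq : (((p.2.length : Int)) == 1) = false := by simp [hlen]
      by_cases hdbl : p.1 ∈ doubled
      · have hdm : p.1 ∈ death := (hdc p List.mem_cons_self).2 hdbl
        have ha : aStep2 (death, counter) p = (death, counter) := by
          unfold aStep2
          rw [if_neg (by simp [hbeq]), if_neg (by simp [hdm])]
        have hb : bStep2 doubled (res, counter) p = (res, counter) := by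
          unfold bStep2
          rw [if_neg (by simp [hdbl])]
        rw [ha, hb]
        have hih := ih doubled death counter res hnd'
          (fun q hq => hne q (List.mem_cons_of_mem _ hq))
          (fun q hq => hdc q (List.mem_cons_of_mem _ hq))
          (fun q hq => hres q (List.mem_cons_of_mem _ hq))
        refine ⟨hih.1, ?_⟩
        rw [hih.2, List.filter_cons_of_neg (by simp [hdbl])]
      · have hdm : p.1 ∉ death := fun h => hdbl ((hdc p List.mem_cons_self).1 h)
        have ha : aStep2 (death, counter) p
            = (death, counter.modify (p.2.length : Int) [] (· ++ [p.1])) := by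
          rw [← insert_modify counter ((p.2.length : Int)) p.1]
          unfold aStep2
          rw [if_neg (by simp [hbeq]), if_pos (by simp [hdm])]
        have hb : bStep2 doubled (res, counter) p
            = (res.insert p.1 p.2, counter.modify (p.2.length : Int) [] (· ++ [p.1])) := by
          unfold bStep2
          rw [if_pos (by simp [h1lt, hdbl])]
        rw [ha, hb]
        have hres' : ∀ q ∈ l, (res.insert p.1 p.2).contains q.1 = false := by
          intro q hq
          rw [PySem.Dict.contains_insert]
          simp [hkey q hq, hres q (List.mem_cons_of_mem _ hq)]
        have hih := ih doubled death (counter.modify (p.2.length : Int) [] (· ++ [p.1]))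
          (res.insert p.1 p.2) hnd'
          (fun q hq => hne q (List.mem_cons_of_mem _ hq))
          (fun q hq => hdc q (List.mem_cons_of_mem _ hq)) hres'
        refine ⟨hih.1, ?_⟩
        rw [hih.2,
          PySem.Dict.items_insert_of_not_contains res p.2 (hres p List.mem_cons_self),
          List.filter_cons_of_pos (by simp [h1lt, hdbl])]
        simp

-- popping every member of a list of keys is a filter on the items
theorem foldl_erase (S : List String) : ∀ (d : PySem.Dict String (List Int)),
    (S.foldl (fun d ch => d.erase ch) d).items = d.items.filter (fun p => !(S.contains p.1)) := by
  induction S with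
  | nil => intro d; simp
  | cons x S ih =>
    intro d
    rw [List.foldl_cons, ih]
    show ((d.erase x).items).filter _ = _
    unfold PySem.Dict.erase
    rw [List.filter_filter]
    apply List.filter_congr
    intro p _
    by_cases h : p.1 = x <;> simp [h]

-- main first-loop lemma: A's fold tracks B's run loop
theorem main_loop : ∀ (n : Nat) (cs : List Char), cs.length ≤ n →
    ∀ (i : Int) (death : PySem.Set String) (index : PySem.Dict String (List Int)) (prev : Option String),
    (∀ c, cs.head? = some c → prev ≠ some (String.ofList [c])) →
    ((PySem.List.enumerate cs i).foldl aStep (death, index, prev)).1 = (bLoop cs i index death).2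
    ∧ ((PySem.List.enumerate cs i).foldl aStep (death, index, prev)).2.1 = (bLoop cs i index death).1 := by
  intro n
  induction n with
  | zero =>
    intro cs hcs i death index prev _
    have : cs = [] := List.eq_nil_of_length_eq_zero (Nat.le_zero.1 hcs)
    subst this
    simp [bLoop]
  | succ n ih =>
    intro cs hcs i death index prev hprev
    cases cs with
    | nil => simp [bLoop]
    | cons c cs =>
      have hne : (some (String.ofList [c]) == prev) = false := by
        rw [beq_eq_false_iff_ne]
        exact fun h => hprev c rfl h.symm
      have hstep : aStep (death, index, prev) (i, c)
          = (death, index.modify (String.ofList [c]) [] (· ++ [i]), some (String.ofList [c])) := by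
        rw [← insert_modify index (String.ofList [c]) i]
        simp only [aStep, hne, Bool.false_eq_true, if_neg, not_false_iff]
        split <;> rfl
      rw [PySem.List.enumerate_cons, List.foldl_cons, hstep,
        consume c cs (i + 1) death (index.modify (String.ofList [c]) [] (· ++ [i]))]
      have hrest : (bRun c cs).2.length ≤ n := by
        have := bRun_len c cs
        simp only [List.length_cons] at hcs
        omega
      have hprev' : ∀ c', (bRun c cs).2.head? = some c' →
          (some (String.ofList [c]) : Option String) ≠ some (String.ofList [c']) := by
        intro c' hc' h
        have : c = c' := sCh_inj.1 (Option.some.injEq _ _ ▸ (by simpa using h))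
        exact bRun_head c cs c' hc' (this ▸ rfl)
      have := ih (bRun c cs).2 hrest (i + 1 + ((bRun c cs).1 : Int)) 
        (if 0 < (bRun c cs).1 then PySem.Set.add death (String.ofList [c]) else death)
        (index.modify (String.ofList [c]) [] (· ++ [i])) (some (String.ofList [c])) hprev'
      have harith : (i + 1) + ((bRun c cs).1 : Int) = i + 1 + ((bRun c cs).1 : Int) := rfl
      rw [show bLoop (c :: cs) i index death
          = bLoop (bRun c cs).2 (i + 1 + ((bRun c cs).1 : Int))
              (index.modify (String.ofList [c]) [] (· ++ [i]))
              (if i + 1 + ((bRun c cs).1 : Int) - i > 1 then PySem.Set.add death (String.ofList [c]) else death)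
          from by rw [bLoop]]
      have hif : (if i + 1 + ((bRun c cs).1 : Int) - i > 1
            then PySem.Set.add death (String.ofList [c]) else death)
          = (if 0 < (bRun c cs).1 then PySem.Set.add death (String.ofList [c]) else death) := by
        by_cases hk : 0 < (bRun c cs).1
        · have : i + 1 + ((bRun c cs).1 : Int) - i > 1 := by
            have : (1 : Int) ≤ ((bRun c cs).1 : Int) := by exact_mod_cast hk
            omega
          simp [this, hk]
        · have hk0 : (bRun c cs).1 = 0 := Nat.eq_zero_of_not_pos hk
          simp [hk0]
      rw [hif]
      exact this

-- ===== VERDICT (by name: the statement is the Claim_ definition above) =====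
theorem del_red_spec : Claim_equal_del_red := by
  intro string _
  unfold Spec_del_red
  obtain ⟨hdeath, hindex⟩ := main_loop string.toList.length string.toList le_rfl 0
    PySem.Set.empty PySem.Dict.empty none (fun c _ h => by cases h)
  obtain ⟨hnodup, hne⟩ := aFold_inv (PySem.List.enumerate string.toList 0)
    (PySem.Set.empty, PySem.Dict.empty, none)
    (by simp [PySem.Dict.keys, PySem.Dict.empty]) (by simp [PySem.Dict.empty])
  rw [hindex] at hnodup hne
  rw [show del_red string
      = (((((bLoop string.toList 0 PySem.Dict.empty PySem.Set.empty).1.items.foldl aStep2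
            ((bLoop string.toList 0 PySem.Dict.empty PySem.Set.empty).2, PySem.Dict.empty)).1).foldl
            (fun d ch => d.erase ch) (bLoop string.toList 0 PySem.Dict.empty PySem.Set.empty).1).items,
          ((bLoop string.toList 0 PySem.Dict.empty PySem.Set.empty).1.items.foldl aStep2
            ((bLoop string.toList 0 PySem.Dict.empty PySem.Set.empty).2, PySem.Dict.empty)).2.items)
      from by simp only [del_red]; rw [hdeath, hindex]]
  set b := bLoop string.toList 0 PySem.Dict.empty PySem.Set.empty with hb
  have hndmap : (b.1.items.map Prod.fst).Nodup := by
    simpa [PySem.Dict.keys] using hnodup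
  have hl2 := loop2_eq b.1.items b.2 b.2 PySem.Dict.empty PySem.Dict.empty hndmap hne
    (fun p _ => Iff.rfl) (fun p _ => PySem.Dict.contains_empty _)
  obtain ⟨hcnt, hresit⟩ := hl2
  refine Prod.ext ?_ ?_
  · show _ = (b.1.items.foldl (bStep2 b.2) (PySem.Dict.empty, PySem.Dict.empty)).1.items
    rw [foldl_erase, hresit]
    show b.1.items.filter _ = ([] : List (String × List Int)) ++ b.1.items.filter _
    rw [List.nil_append]
    apply List.filter_congr
    intro p hp
    set death2 : PySem.Set String := (b.1.items.foldl aStep2 (b.2, PySem.Dict.empty)).1 with hd2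
    have hchar : p.1 ∈ death2 ↔ p.1 ∈ b.2 ∨ p.2.length = 1 := by
      rw [hd2, death2_mem]
      constructor
      · rintro (h | ⟨q, hq, hx, hl⟩)
        · exact Or.inl h
        · have hqp : q = p := List.inj_on_of_nodup_map hndmap hq hp hx.symm
          subst hqp
          exact Or.inr hl
      · rintro (h | h)
        · exact Or.inl h
        · exact Or.inr ⟨p, hp, rfl, h⟩
    have hne1 : p.2 ≠ [] := hne p hp
    have hlen0 : p.2.length ≠ 0 := by simpa using hne1
    by_cases hx : p.1 ∈ death2
    · rcases hchar.1 hx with h | h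
      · simp [hx, h]
      · simp [hx, h]
    · have h1 : p.1 ∉ b.2 := fun h => hx (hchar.2 (Or.inl h))
      have h2 : p.2.length ≠ 1 := fun h => hx (hchar.2 (Or.inr h))
      have h3 : 1 < p.2.length := by omega
      simp [hx, h1, h3]
  · show (b.1.items.foldl aStep2 (b.2, PySem.Dict.empty)).2.items
        = (b.1.items.foldl (bStep2 b.2) (PySem.Dict.empty, PySem.Dict.empty)).2.items
    rw [hcnt]
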